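-- pv_equiv track=rewrite | github.com/AldoRastrelli/Guia-Algoritmos1-Essaya | finales_9.py | como_juegan
-- ===== SOURCE A (Python) =====
-- def como_juegan(lista,dic):
--
--     dic_dep = {}
--
--     for nombre in lista:
--         dic_dep[nombre] = []
--
--     for deporte in dic:
--
--         for persona in dic[deporte]:
--
--             if persona in dic_dep:
--
--                 tupla = (dic[deporte][persona],deporte)
--                 dic_dep[persona].append(tupla)
--
--     return dic_dep
-- ===== SOURCE B (Python) =====
-- def como_juegan(lista, dic):
--     return {nombre: [(dic[dep][nombre], dep) for dep in dic if nombre in dic[dep]]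
--             for nombre in lista}
-- ===== Notes on version B (the rewrite author's own statement) =====
-- stated objective: simpler
-- what changed: Inverts the loop nesting: a single dict comprehension builds each name's list directly by scanning the sports dict per name, instead of initializing empty lists and appending while iterating every (sport, person) entry.
import Mathlib
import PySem

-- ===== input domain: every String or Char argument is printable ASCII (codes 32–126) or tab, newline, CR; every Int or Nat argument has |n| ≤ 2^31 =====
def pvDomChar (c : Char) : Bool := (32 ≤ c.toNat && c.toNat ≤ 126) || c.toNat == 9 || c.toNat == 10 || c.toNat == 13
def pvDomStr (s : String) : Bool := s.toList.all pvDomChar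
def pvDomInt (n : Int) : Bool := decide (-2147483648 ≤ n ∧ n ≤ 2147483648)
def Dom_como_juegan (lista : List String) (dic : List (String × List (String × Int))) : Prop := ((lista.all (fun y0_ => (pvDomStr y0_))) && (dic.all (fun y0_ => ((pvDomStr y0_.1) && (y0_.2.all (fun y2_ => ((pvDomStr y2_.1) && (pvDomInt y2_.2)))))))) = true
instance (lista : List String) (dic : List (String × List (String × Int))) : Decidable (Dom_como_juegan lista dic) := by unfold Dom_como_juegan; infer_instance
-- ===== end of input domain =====

-- B inverts the loop nesting: one dict comprehension builds each name's list directly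
-- by scanning the sports per name, instead of appending while scanning all entries.

-- first-match association-list lookup with default = Python's d[k] (d.get(k, dflt)) on a dict given as pairs
def pyLookupD {α : Type} (l : List (String × α)) (k : String) (dflt : α) : α :=
  match l.find? (fun p => p.1 == k) with
  | some p => p.2
  | none => dflt

-- ===== PORT A =====
def como_juegan (lista : List String) (dic : List (String × List (String × Int))) : List (String × List (Int × String)) :=
  -- dic_dep = {}; for nombre in lista: dic_dep[nombre] = []
  let d0 : PySem.Dict String (List (Int × String)) :=
    lista.foldl (fun d nombre => d.insert nombre []) PySem.Dict.empty
  -- for deporte in dic: for persona in dic[deporte]: if persona in dic_dep: dic_dep[persona].append((dic[deporte][persona], deporte))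
  let d1 :=
    dic.foldl (fun d ent =>
      let personas := pyLookupD dic ent.1 []          -- dic[deporte]
      personas.foldl (fun d per =>
        if d.contains per.1 then                       -- persona in dic_dep
          d.modify per.1 [] (fun l => l ++ [(pyLookupD personas per.1 0, ent.1)])
        else d) d) d0
  d1.items

-- ===== PORT B =====
-- [(dic[dep][nombre], dep) for dep in dic if nombre in dic[dep]]
def contribFor (dic : List (String × List (String × Int))) (nombre : String) : List (Int × String) :=
  dic.filterMap (fun ent =>
    match (pyLookupD dic ent.1 []).find? (fun p => p.1 == nombre) with
    | some p => some (p.2, ent.1)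
    | none => none)

def como_juegan_alt (lista : List String) (dic : List (String × List (String × Int))) : List (String × List (Int × String)) :=
  (lista.foldl (fun d nombre => d.insert nombre (contribFor dic nombre)) PySem.Dict.empty).items

-- ===== PRECONDITION & SPEC =====
-- Pre_ requires the association lists representing the outer dict and each inner dict to have
-- pairwise-distinct keys: that is the invariant of every Python dict, so no input A actually
-- receives (a dict cannot carry duplicate keys) is excluded.
def Pre_como_juegan (lista : List String) (dic : List (String × List (String × Int))) : Prop :=
  (dic.map Prod.fst).Nodup ∧ ∀ ent ∈ dic, (ent.2.map Prod.fst).Nodup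
instance (lista : List String) (dic : List (String × List (String × Int))) : Decidable (Pre_como_juegan lista dic) := by unfold Pre_como_juegan; infer_instance

def pvWitness_como_juegan : List String × (List (String × List (String × Int))) :=
  (["ana", "bob"], [("futbol", [("ana", 3), ("bob", 1)]), ("tenis", [("ana", 2)])])

def Spec_como_juegan (lista : List String) (dic : List (String × List (String × Int))) (out : List (String × List (Int × String))) : Prop := out = como_juegan_alt lista dic
instance (lista : List String) (dic : List (String × List (String × Int))) (out : List (String × List (Int × String))) : Decidable (Spec_como_juegan lista dic out) := by unfold Spec_como_juegan; infer_instance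

-- ===== CLAIM (what is proved, stated in full; the proofs are below) =====
def Claim_equal_como_juegan : Prop := ∀ (lista : List String) (dic : List (String × List (String × Int))), Dom_como_juegan lista dic → Pre_como_juegan lista dic → Spec_como_juegan lista dic (como_juegan lista dic)

-- ===== LEMMAS AND PROOFS =====

-- proof-only helper: A's inner per-sport loop, with the appended tuple abstracted as g
def condFold (g : String × Int → Int × String) (personas : List (String × Int))
    (d : PySem.Dict String (List (Int × String))) : PySem.Dict String (List (Int × String)) :=
  personas.foldl (fun d per =>
    if d.contains per.1 then d.modify per.1 [] (fun l => l ++ [g per]) else d) d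

-- proof-only helper: the per-name contribution with the outer lookup already resolved to ent.2
def contrib' (sports : List (String × List (String × Int))) (k : String) : List (Int × String) :=
  sports.filterMap (fun ent =>
    match ent.2.find? (fun p => p.1 == k) with
    | some p => some (p.2, ent.1)
    | none => none)

theorem find?_fst_eq_self {α : Type} (l : List (String × α)) (ent : String × α)
    (h : (l.map Prod.fst).Nodup) (hm : ent ∈ l) :
    l.find? (fun p => p.1 == ent.1) = some ent := by
  induction l with
  | nil => cases hm
  | cons a t ih =>
    simp only [List.map_cons, List.nodup_cons] at h
    rcases List.mem_cons.mp hm with rfl | hmem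
    · simp [List.find?]
    · have hne : ¬ (a.1 == ent.1) = true := by
        intro hbeq
        exact h.1 (eq_of_beq hbeq ▸ List.mem_map.mpr ⟨ent, hmem, rfl⟩)
      simp only [List.find?, Bool.not_eq_true] at hne ⊢
      rw [hne]
      exact ih h.2 hmem

theorem pyLookupD_eq {α : Type} (l : List (String × α)) (ent : String × α) (dflt : α)
    (h : (l.map Prod.fst).Nodup) (hm : ent ∈ l) :
    pyLookupD l ent.1 dflt = ent.2 := by
  unfold pyLookupD
  rw [find?_fst_eq_self l ent h hm]

theorem filter_fst_eq_find?_toList {α : Type} (l : List (String × α)) (k : String)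
    (h : (l.map Prod.fst).Nodup) :
    l.filter (fun p => p.1 == k) = (l.find? (fun p => p.1 == k)).toList := by
  induction l with
  | nil => rfl
  | cons a t ih =>
    simp only [List.map_cons, List.nodup_cons] at h
    by_cases hak : (a.1 == k) = true
    · have ht : t.filter (fun p => p.1 == k) = [] := by
        apply List.filter_eq_nil_iff.mpr
        intro p hp hbeq
        exact h.1 (eq_of_beq hak ▸ (eq_of_beq hbeq ▸ List.mem_map.mpr ⟨p, hp, rfl⟩))
      simp [List.find?, hak, ht]
    · simp only [Bool.not_eq_true] at hak
      simp [List.find?, hak, ih h.2]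

theorem keys_condFold (g : String × Int → Int × String) (personas : List (String × Int)) :
    ∀ d : PySem.Dict String (List (Int × String)), (condFold g personas d).keys = d.keys := by
  induction personas with
  | nil => intro d; rfl
  | cons per t ih =>
    intro d
    simp only [condFold, List.foldl_cons] at *
    by_cases hc : d.contains per.1 = true
    · rw [if_pos hc, ih]
      rw [PySem.Dict.keys_modify, PySem.Dict.keys_insert_of_contains]
      exact hc
    · rw [if_neg hc, ih]

theorem contains_condFold (g : String × Int → Int × String) (personas : List (String × Int))
    (d : PySem.Dict String (List (Int × String))) (k : String) :
    (condFold g personas d).contains k = d.contains k := by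
  rw [PySem.Dict.contains_eq_decide_mem_keys, PySem.Dict.contains_eq_decide_mem_keys,
    keys_condFold]

theorem condFold_eq_plain (g : String × Int → Int × String) (personas : List (String × Int)) :
    ∀ d : PySem.Dict String (List (Int × String)),
      condFold g personas d =
        (personas.filter (fun per => d.contains per.1)).foldl
          (fun d per => d.modify per.1 [] (fun l => l ++ [g per])) d := by
  induction personas with
  | nil => intro d; rfl
  | cons per t ih =>
    intro d
    simp only [condFold, List.foldl_cons, List.filter_cons] at *
    by_cases hc : d.contains per.1 = true
    · rw [if_pos hc, hc, ih]
      have hcont : ∀ x, (d.modify per.1 [] (fun l => l ++ [g per])).contains x = d.contains x := by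
        intro x
        rw [PySem.Dict.contains_modify]
        by_cases hx : (x == per.1) = true
        · simp [hx, eq_of_beq hx ▸ hc]
        · simp only [Bool.not_eq_true] at hx; simp [hx]
      rw [List.filter_congr (fun x _ => hcont x.1)]
      simp [List.foldl_cons]
    · rw [if_neg hc, ih]
      simp only [Bool.not_eq_true] at hc
      simp [hc]

theorem getD_plainFold (g : String × Int → Int × String) (l : List (String × Int))
    (d : PySem.Dict String (List (Int × String))) (k : String) :
    (l.foldl (fun d per => d.modify per.1 [] (fun acc => acc ++ [g per])) d).getD k [] =
      d.getD k [] ++ (l.filter (fun per => per.1 == k)).map g := by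
  have h := PySem.Dict.getD_foldl_modify_append (l.map (fun per => (per.1, g per))) d k
  rw [List.foldl_map] at h
  rw [h, List.filter_map, List.map_map]
  rfl

theorem getD_condFold (g : String × Int → Int × String) (personas : List (String × Int))
    (d : PySem.Dict String (List (Int × String))) (k : String)
    (hk : d.contains k = true) (hnd : (personas.map Prod.fst).Nodup) :
    (condFold g personas d).getD k [] =
      d.getD k [] ++ (match personas.find? (fun p => p.1 == k) with
                      | some p => [g p]
                      | none => []) := by
  rw [condFold_eq_plain, getD_plainFold, List.filter_filter]
  have hfil : personas.filter (fun a => (a.1 == k) && d.contains a.1) =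
      personas.filter (fun p => p.1 == k) := by
    apply List.filter_congr
    intro per _
    by_cases hp : (per.1 == k) = true
    · simp [hp, eq_of_beq hp ▸ hk]
    · simp only [Bool.not_eq_true] at hp; simp [hp]
  rw [hfil, filter_fst_eq_find?_toList personas k hnd]
  cases personas.find? (fun p => p.1 == k) <;> rfl

theorem getD_outerFold (sports : List (String × List (String × Int))) :
    ∀ (d : PySem.Dict String (List (Int × String))) (k : String),
      d.contains k = true →
      (∀ ent ∈ sports, (ent.2.map Prod.fst).Nodup) →
      (sports.foldl (fun d ent =>
          condFold (fun per => (pyLookupD ent.2 per.1 0, ent.1)) ent.2 d) d).getD k [] =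
        d.getD k [] ++ contrib' sports k := by
  induction sports with
  | nil => intro d k _ _; simp [contrib']
  | cons ent rest ih =>
    intro d k hk hnd
    simp only [List.foldl_cons]
    rw [ih _ k (by rw [contains_condFold]; exact hk) (fun e he => hnd e (List.mem_cons_of_mem _ he))]
    rw [getD_condFold _ _ _ _ hk (hnd ent (List.mem_cons_self))]
    simp only [contrib', List.filterMap_cons]
    cases hfind : ent.2.find? (fun p => p.1 == k) with
    | none => simp
    | some p =>
      have hp : p ∈ ent.2 := List.mem_of_find?_eq_some hfind
      have hv : pyLookupD ent.2 p.1 0 = p.2 :=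
        pyLookupD_eq ent.2 p 0 (hnd ent (List.mem_cons_self)) hp
      simp [hv, List.append_assoc]

theorem keys_outerFold (sports : List (String × List (String × Int))) :
    ∀ d : PySem.Dict String (List (Int × String)),
      (sports.foldl (fun d ent =>
          condFold (fun per => (pyLookupD ent.2 per.1 0, ent.1)) ent.2 d) d).keys = d.keys := by
  induction sports with
  | nil => intro d; rfl
  | cons ent rest ih =>
    intro d
    simp only [List.foldl_cons]
    rw [ih, keys_condFold]

theorem getD_insertFold (f : String → List (Int × String)) (lista : List String) :
    ∀ (d : PySem.Dict String (List (Int × String))) (k : String),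
      (lista.foldl (fun d n => d.insert n (f n)) d).getD k [] =
        if k ∈ lista then f k else d.getD k [] := by
  induction lista with
  | nil => intro d k; simp
  | cons n t ih =>
    intro d k
    simp only [List.foldl_cons]
    rw [ih]
    by_cases ht : k ∈ t
    · simp [ht]
    · by_cases hn : k = n
      · simp [hn]
      · simp [ht, hn, PySem.Dict.getD_insert]

-- ===== VERDICT (by name: the statement is the Claim_ definition above) =====
theorem como_juegan_spec : Claim_equal_como_juegan := by
  intro lista dic _ hpre
  unfold Spec_como_juegan como_juegan como_juegan_alt
  obtain ⟨hout, hinn⟩ := hpre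
  show (dic.foldl (fun d ent =>
      let personas := pyLookupD dic ent.1 []
      personas.foldl (fun d per =>
        if d.contains per.1 then
          d.modify per.1 [] (fun l => l ++ [(pyLookupD personas per.1 0, ent.1)])
        else d) d)
      (lista.foldl (fun d nombre => d.insert nombre []) PySem.Dict.empty)).items
    = (lista.foldl (fun d nombre => d.insert nombre (contribFor dic nombre))
        PySem.Dict.empty).items
  -- resolve the outer lookups to the entry itself (outer keys are Nodup)
  have hcongr : dic.foldl (fun d ent =>
      let personas := pyLookupD dic ent.1 []
      personas.foldl (fun d per =>
        if d.contains per.1 then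
          d.modify per.1 [] (fun l => l ++ [(pyLookupD personas per.1 0, ent.1)])
        else d) d)
      (lista.foldl (fun d nombre => d.insert nombre []) PySem.Dict.empty)
    = dic.foldl (fun d ent =>
        condFold (fun per => (pyLookupD ent.2 per.1 0, ent.1)) ent.2 d)
      (lista.foldl (fun d nombre => d.insert nombre []) PySem.Dict.empty) := by
    apply PySem.List.foldl_congr_mem
    intro acc ent hm
    simp only [condFold]
    rw [pyLookupD_eq dic ent [] hout hm]
  rw [hcongr]
  have hcontrib : ∀ k, contribFor dic k = contrib' dic k := by
    intro k
    unfold contribFor contrib'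
    apply List.filterMap_congr
    intro ent hm
    rw [pyLookupD_eq dic ent [] hout hm]
  -- keys of both dicts
  have hk0 : (lista.foldl (fun (d : PySem.Dict String (List (Int × String))) nombre => d.insert nombre []) PySem.Dict.empty).keys
      = PySem.Set.ofList lista := by
    rw [PySem.Dict.keys_foldl_insert lista (fun _ _ => [])]
    simp [PySem.Set.update_nil_left]
  have hkB : (lista.foldl (fun (d : PySem.Dict String (List (Int × String))) nombre => d.insert nombre (contribFor dic nombre))
      PySem.Dict.empty).keys = PySem.Set.ofList lista := by
    rw [PySem.Dict.keys_foldl_insert lista (fun _ n => contribFor dic n)]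
    simp [PySem.Set.update_nil_left]
  have hkA : (dic.foldl (fun d ent =>
      condFold (fun per => (pyLookupD ent.2 per.1 0, ent.1)) ent.2 d)
      (lista.foldl (fun (d : PySem.Dict String (List (Int × String))) nombre => d.insert nombre []) PySem.Dict.empty)).keys
      = PySem.Set.ofList lista := by
    rw [keys_outerFold, hk0]
  have hnodup : (PySem.Set.ofList lista : List String).Nodup := PySem.Set.nodup_ofList lista
  rw [PySem.Dict.items_eq_map_keys _ (hkA ▸ hnodup) [],
      PySem.Dict.items_eq_map_keys _ (hkB ▸ hnodup) [], hkA, hkB]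
  apply List.map_congr_left
  intro k hkmem
  have hkl : k ∈ lista := (PySem.Set.mem_ofList lista k).mp hkmem
  have hgA : (lista.foldl (fun (d : PySem.Dict String (List (Int × String))) nombre => d.insert nombre []) PySem.Dict.empty).contains k
      = true := by
    rw [PySem.Dict.contains_eq_decide_mem_keys, hk0]
    simpa using hkmem
  rw [getD_outerFold dic _ k hgA hinn,
      getD_insertFold (fun _ => []) lista PySem.Dict.empty k,
      getD_insertFold (fun n => contribFor dic n) lista PySem.Dict.empty k]
  simp [hkl, hcontrib k]
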